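-- pv_equiv track=rewrite | github.com/quantumxiaol/umamusume-qq-bot | src/umamusume_qq_bot/text_utils.py | resolve_character_selection
-- ===== SOURCE A (Python) =====
-- from typing import Sequence
--
-- def resolve_character_selection(raw_text: str, options: Sequence[str]) -> str | None:
--     text = (raw_text or "").strip()
--     if not text or not options:
--         return None
--
--     if text.isdigit():
--         index = int(text) - 1
--         if 0 <= index < len(options):
--             return options[index]
--
--     lower_text = text.lower()
--     exact_matches = [item for item in options if item.lower() == lower_text]
--     if exact_matches:
--         return exact_matches[0]
--
--     contains_matches = [item for item in options if lower_text in item.lower()]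
--     if len(contains_matches) == 1:
--         return contains_matches[0]
--
--     return None
-- ===== SOURCE B (Python) =====
-- def resolve_character_selection(raw_text, options):
--     text = (raw_text or "").strip()
--     if not text or not options:
--         return None
--
--     if text.isdigit():
--         index = int(text) - 1
--         if 0 <= index < len(options):
--             return options[index]
--
--     lower_text = text.lower()
--     first_exact = None
--     contains_count = 0
--     sole_contains = None
--     for item in options:
--         low = item.lower()
--         if low == lower_text and first_exact is None:
--             first_exact = item
--         if lower_text in low:
--             contains_count += 1
--             sole_contains = item
--     if first_exact is not None:
--         return first_exact
--     if contains_count == 1: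
--         return sole_contains
--     return None
-- ===== Notes on version B (the rewrite author's own statement) =====
-- stated objective: alternative
-- what changed: Replaces A's two separate list-comprehension scans (exact matches, then substring matches) with a single loop over options that maintains the first exact match, the substring-match count and the last substring match, then applies the same decision rule.
import Mathlib
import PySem

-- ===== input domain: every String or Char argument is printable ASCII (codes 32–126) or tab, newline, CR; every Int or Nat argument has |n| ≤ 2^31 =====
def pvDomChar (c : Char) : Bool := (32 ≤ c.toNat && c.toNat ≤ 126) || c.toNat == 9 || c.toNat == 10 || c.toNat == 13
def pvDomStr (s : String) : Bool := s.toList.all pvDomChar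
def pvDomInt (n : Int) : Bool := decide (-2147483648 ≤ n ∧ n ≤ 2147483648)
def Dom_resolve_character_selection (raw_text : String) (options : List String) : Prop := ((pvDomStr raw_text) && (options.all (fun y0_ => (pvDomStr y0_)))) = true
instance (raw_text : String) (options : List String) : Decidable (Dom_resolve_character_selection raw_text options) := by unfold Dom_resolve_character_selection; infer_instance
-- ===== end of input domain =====

-- B replaces A's two separate filter scans (exact, then substring) with one loop over options
-- maintaining first exact match, substring-match count and last substring match; same decision rule (alternative decomposition, same cost).


-- ===== PORT A =====
def resolve_character_selection (raw_text : String) (options : List String) : Option String :=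
  let text := PySem.Str.strip raw_text
  if text == "" || options.isEmpty then none
  else
    -- the code after the digit branch falls through to; shared tail of A's control flow
    let rest : Option String :=
      let lower_text := PySem.Str.lower text
      let exact_matches := options.filter (fun item => PySem.Str.lower item == lower_text)
      match exact_matches with
      | m :: _ => some m
      | [] =>
        let contains_matches := options.filter (fun item => PySem.Str.isIn lower_text (PySem.Str.lower item))
        if contains_matches.length == 1 then PySem.List.pyGet? contains_matches 0 else none
    if PySem.Str.strIsdigit text then
      -- text.isdigit() guarantees int(text) succeeds, so the default of getD is never used
      let index := (PySem.Int.ofStr? text).getD 0 - 1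
      if 0 ≤ index ∧ index < (options.length : Int) then PySem.List.pyGet? options index
      else rest
    else rest

-- ===== PORT B =====
-- the loop body of Source B's single pass: (first_exact, contains_count, sole_contains)
def pvScanStep (lower_text : String) (acc : Option String × Int × Option String) (item : String) :
    Option String × Int × Option String :=
  let low := PySem.Str.lower item
  let acc1 := if low == lower_text && acc.1.isNone then (some item, acc.2) else acc
  if PySem.Str.isIn lower_text low then (acc1.1, acc1.2.1 + 1, some item) else acc1

def resolve_character_selection_alt (raw_text : String) (options : List String) : Option String :=
  let text := PySem.Str.strip raw_text
  if text == "" || options.isEmpty then none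
  else
    let rest : Option String :=
      let lower_text := PySem.Str.lower text
      match options.foldl (pvScanStep lower_text) (none, 0, none) with
      | (some e, _, _) => some e
      | (none, cnt, sole) => if cnt == 1 then sole else none
    if PySem.Str.strIsdigit text then
      let index := (PySem.Int.ofStr? text).getD 0 - 1
      if 0 ≤ index ∧ index < (options.length : Int) then PySem.List.pyGet? options index
      else rest
    else rest

-- ===== PRECONDITION & SPEC =====
def Spec_resolve_character_selection (raw_text : String) (options : List String) (out : Option String) : Prop := out = resolve_character_selection_alt raw_text options
instance (raw_text : String) (options : List String) (out : Option String) : Decidable (Spec_resolve_character_selection raw_text options out) := by unfold Spec_resolve_character_selection; infer_instance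

-- ===== CLAIM (what is proved, stated in full; the proofs are below) =====
def Claim_equal_resolve_character_selection : Prop := ∀ (raw_text : String) (options : List String), Dom_resolve_character_selection raw_text options → Spec_resolve_character_selection raw_text options (resolve_character_selection raw_text options)

-- ===== LEMMAS AND PROOFS =====

theorem pvStep_fst (lt : String) (acc : Option String × Int × Option String) (x : String) :
    (pvScanStep lt acc x).1 = if PySem.Str.lower x == lt && acc.1.isNone then some x else acc.1 := by
  simp only [pvScanStep]; split_ifs <;> rfl

theorem pvStep_cnt (lt : String) (acc : Option String × Int × Option String) (x : String) :
    (pvScanStep lt acc x).2.1 = acc.2.1 + (if PySem.Str.isIn lt (PySem.Str.lower x) then 1 else 0) := by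
  simp only [pvScanStep]; split_ifs <;> simp

theorem pvStep_sole (lt : String) (acc : Option String × Int × Option String) (x : String) :
    (pvScanStep lt acc x).2.2 = if PySem.Str.isIn lt (PySem.Str.lower x) then some x else acc.2.2 := by
  simp only [pvScanStep]; split_ifs <;> rfl

theorem getLast?_cons_eq_or {α : Type} (x : α) (l : List α) :
    (x :: l).getLast? = l.getLast?.or (some x) := by
  cases l with
  | nil => rfl
  | cons y ys => rw [List.getLast?_cons_cons]; cases h : (y :: ys).getLast? <;> simp_all

theorem pvScan_fst (lt : String) (opts : List String) (acc : Option String × Int × Option String) :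
    (opts.foldl (pvScanStep lt) acc).1
      = acc.1.or (opts.filter (fun i => PySem.Str.lower i == lt)).head? := by
  induction opts generalizing acc with
  | nil => cases h : acc.1 <;> simp [h]
  | cons x xs ih =>
    rw [List.foldl_cons, ih, pvStep_fst, List.filter_cons]
    by_cases hx : (PySem.Str.lower x == lt) = true
    · cases h : acc.1 <;> simp [hx]
    · simp [hx]

theorem pvScan_cnt (lt : String) (opts : List String) (acc : Option String × Int × Option String) :
    (opts.foldl (pvScanStep lt) acc).2.1
      = acc.2.1 + ((opts.filter (fun i => PySem.Str.isIn lt (PySem.Str.lower i))).length : Int) := by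
  induction opts generalizing acc with
  | nil => simp
  | cons x xs ih =>
    rw [List.foldl_cons, ih, pvStep_cnt, List.filter_cons]
    by_cases hx : PySem.Str.isIn lt (PySem.Str.lower x) = true
    · rw [if_pos hx, if_pos hx, List.length_cons]; push_cast; ring
    · rw [if_neg hx, if_neg hx]; ring

theorem pvScan_sole (lt : String) (opts : List String) (acc : Option String × Int × Option String) :
    (opts.foldl (pvScanStep lt) acc).2.2
      = ((opts.filter (fun i => PySem.Str.isIn lt (PySem.Str.lower i))).getLast?.or acc.2.2) := by
  induction opts generalizing acc with
  | nil => cases h : acc.2.2 <;> simp [h]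
  | cons x xs ih =>
    rw [List.foldl_cons, ih, pvStep_sole, List.filter_cons]
    by_cases hx : PySem.Str.isIn lt (PySem.Str.lower x) = true
    · rw [if_pos hx, if_pos hx, getLast?_cons_eq_or, Option.or_assoc, Option.some_or]
    · rw [if_neg hx, if_neg hx]

theorem pvScan_eq (lt : String) (opts : List String) :
    (match opts.foldl (pvScanStep lt) (none, 0, none) with
      | (some e, _, _) => some e
      | (none, cnt, sole) => if cnt == 1 then sole else none)
      = (match opts.filter (fun item => PySem.Str.lower item == lt) with
      | m :: _ => some m
      | [] =>
        let cm := opts.filter (fun item => PySem.Str.isIn lt (PySem.Str.lower item))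
        if cm.length == 1 then PySem.List.pyGet? cm 0 else none) := by
  have hf := pvScan_fst lt opts (none, 0, none)
  have hc := pvScan_cnt lt opts (none, 0, none)
  have hs := pvScan_sole lt opts (none, 0, none)
  rcases hfold : opts.foldl (pvScanStep lt) (none, 0, none) with ⟨e, c, s⟩
  rw [hfold] at hf hc hs
  simp only [Option.none_or, Option.or_none, zero_add] at hf hc hs
  cases hfe : opts.filter (fun item => PySem.Str.lower item == lt) with
  | cons m rest =>
    rw [hfe, List.head?_cons] at hf
    subst hf
    rfl
  | nil =>
    rw [hfe, List.head?_nil] at hf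
    subst hf
    by_cases hlen : (opts.filter (fun item => PySem.Str.isIn lt (PySem.Str.lower item))).length = 1
    · obtain ⟨y, hy⟩ := List.length_eq_one_iff.mp hlen
      rw [hy] at hc hs
      rw [hy]
      simp only [List.getLast?_singleton] at hs
      subst hs
      simp [hc]
    · have hc1 : (c == 1) = false := beq_eq_false_iff_ne.mpr (by rw [hc]; omega)
      have hlen' : ((opts.filter (fun item => PySem.Str.isIn lt (PySem.Str.lower item))).length == 1) = false :=
        beq_eq_false_iff_ne.mpr hlen
      simp only [hc1, hlen', Bool.false_eq_true, if_false]

-- ===== VERDICT (by name: the statement is the Claim_ definition above) =====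
theorem resolve_character_selection_spec : Claim_equal_resolve_character_selection := by
  intro raw_text options _
  unfold Spec_resolve_character_selection resolve_character_selection resolve_character_selection_alt
  dsimp only
  split
  · rfl
  · split
    · split
      · rfl
      · exact (pvScan_eq _ _).symm
    · exact (pvScan_eq _ _).symm
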